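-- pv_equiv track=rewrite | github.com/nguuuquaaa/Belphegor | belphegor/misc.py | lstrip_generator
-- ===== SOURCE A (Python) =====
-- def lstrip_generator(generator):
--     check = True
--     for item in generator:
--         if check:
--             if not item:
--                 continue
--             else:
--                 yield item
--                 check = False
--         else:
--             yield item
-- ===== SOURCE B (Python) =====
-- def lstrip_generator(generator):
--     it = iter(generator)
--     for item in it:
--         if item:
--             yield item
--             break
--     yield from it
-- ===== Notes on version B (the rewrite author's own statement) =====
-- stated objective: simpler
-- what changed: Replaces A's per-item boolean 'check' flag loop by a two-phase generator: a first loop that skips falsy items and breaks at the first truthy one, then 'yield from' streams the rest with no per-item test.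
import Mathlib
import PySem

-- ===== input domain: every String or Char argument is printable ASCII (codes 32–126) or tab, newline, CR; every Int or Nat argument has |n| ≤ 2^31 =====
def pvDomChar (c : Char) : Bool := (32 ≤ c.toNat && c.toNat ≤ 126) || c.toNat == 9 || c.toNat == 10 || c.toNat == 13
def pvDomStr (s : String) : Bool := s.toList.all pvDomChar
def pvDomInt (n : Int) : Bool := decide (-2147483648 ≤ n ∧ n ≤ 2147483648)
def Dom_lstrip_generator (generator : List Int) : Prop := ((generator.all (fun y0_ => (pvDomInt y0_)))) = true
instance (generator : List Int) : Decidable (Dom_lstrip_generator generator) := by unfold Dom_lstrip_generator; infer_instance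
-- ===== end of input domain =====

-- B replaces A's per-item boolean flag by a two-phase generator (skip-then-break, then yield from): simpler decomposition, same cost.

-- ===== PORT A =====
-- A: one loop over the generator carrying a 'check' flag; while check, falsy items are
-- skipped and the first truthy item flips check; afterwards every item is yielded.
def lstrip_generator (generator : List Int) : List Int :=
  (generator.foldl
    (fun (st : Bool × List Int) item =>
      if st.1 then
        if item == 0 then st
        else (false, st.2 ++ [item])
      else (st.1, st.2 ++ [item]))
    (true, [])).2

-- ===== PORT B =====
-- B: first phase walks the iterator skipping falsy items and breaks at the first truthy
-- one (yielding it); second phase ('yield from it') emits the remaining items unchanged.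
def lstrip_generator_alt : List Int → List Int
  | [] => []
  | x :: xs => if x == 0 then lstrip_generator_alt xs else x :: xs

-- ===== PRECONDITION & SPEC =====
def Spec_lstrip_generator (generator : List Int) (out : List Int) : Prop := out = lstrip_generator_alt generator
instance (generator : List Int) (out : List Int) : Decidable (Spec_lstrip_generator generator out) := by unfold Spec_lstrip_generator; infer_instance

-- ===== CLAIM (what is proved, stated in full; the proofs are below) =====
def Claim_equal_lstrip_generator : Prop := ∀ (generator : List Int), Dom_lstrip_generator generator → Spec_lstrip_generator generator (lstrip_generator generator)

-- ===== LEMMAS AND PROOFS =====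
-- Once A's flag is false, the loop just appends every remaining item.
theorem lstrip_foldl_false (l : List Int) (acc : List Int) :
    (l.foldl
      (fun (st : Bool × List Int) item =>
        if st.1 then
          if item == 0 then st
          else (false, st.2 ++ [item])
        else (st.1, st.2 ++ [item]))
      (false, acc)) = (false, acc ++ l) := by
  induction l generalizing acc with
  | nil => simp
  | cons x xs ih =>
    simp only [List.foldl]
    simpa using ih (acc ++ [x])

theorem lstrip_eq_alt (l : List Int) : lstrip_generator l = lstrip_generator_alt l := by
  induction l with
  | nil => rfl
  | cons x xs ih =>
    by_cases h : x = 0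
    · simpa [lstrip_generator, lstrip_generator_alt, h] using ih
    · have hf := lstrip_foldl_false xs [x]
      simp only [beq_iff_eq] at hf
      simp [lstrip_generator, lstrip_generator_alt, h, hf]

-- ===== VERDICT (by name: the statement is the Claim_ definition above) =====
theorem lstrip_generator_spec : Claim_equal_lstrip_generator := by
  intro g _
  exact lstrip_eq_alt g
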